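-- pv_equiv track=rewrite | github.com/rencap12/interview_practice | tip_w2_1.py | arrange_guest_arrival_order
-- ===== SOURCE A (Python) =====
-- def arrange_guest_arrival_order(arrival_pattern):
--     #Initialize result array, and stack
--     stack = ["1"]
--     result = []
--
--     #Loop through our arrival pattern
--     for i in range(2, len(arrival_pattern) + 2):
--         if arrival_pattern[i - 2] == "I":
--             while stack:
--                 result.append(stack.pop())
--         stack.append(str(i))
--
--     #Final stack emptying
--     while stack:
--         result.append(stack.pop())
--
--     #Return the joined string
--     return "".join(result)
-- ===== SOURCE B (Python) =====
-- def arrange_guest_arrival_order(arrival_pattern):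
--     def go(s, start):
--         # length of the leading run of non-'I' characters
--         d = 0
--         while d < len(s) and s[d] != 'I':
--             d += 1
--         # emit start+d, start+d-1, ..., start (the run reversed)
--         block = [str(start + d - t) for t in range(d + 1)]
--         if d < len(s):
--             return block + go(s[d + 1:], start + d + 1)
--         return block
--     return ''.join(go(arrival_pattern, 1))
-- ===== Notes on version B (the rewrite author's own statement) =====
-- stated objective: simpler
-- what changed: Replaces A's stack push/flush loop with a direct recursion over maximal non-'I' runs, emitting each run's guest numbers in descending order and joining once.
import Mathlib
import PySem

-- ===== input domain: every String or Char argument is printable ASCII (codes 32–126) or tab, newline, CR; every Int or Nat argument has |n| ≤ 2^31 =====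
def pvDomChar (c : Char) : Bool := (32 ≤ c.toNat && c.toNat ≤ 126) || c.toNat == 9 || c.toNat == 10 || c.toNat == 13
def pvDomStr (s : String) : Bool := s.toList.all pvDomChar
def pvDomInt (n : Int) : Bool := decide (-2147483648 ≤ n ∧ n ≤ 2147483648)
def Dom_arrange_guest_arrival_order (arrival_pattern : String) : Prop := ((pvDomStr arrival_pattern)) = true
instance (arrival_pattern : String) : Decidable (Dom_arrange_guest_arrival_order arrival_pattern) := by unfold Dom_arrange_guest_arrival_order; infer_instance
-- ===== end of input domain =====

-- B replaces A's push/flush stack with a direct recursion over maximal non-'I' runs,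
-- emitting each run's numbers in descending order (objective: simpler decomposition, same cost).

-- ===== PORT A =====
-- `while stack: result.append(stack.pop())` — pops the last element each step
def pvFlushA : List String → List String → List String
  | [], result => result
  | a :: as, result =>
      pvFlushA (a :: as).dropLast (result ++ [(a :: as).getLast (by simp)])
termination_by s _ => s.length
decreasing_by simp

-- the `for i in range(2, len+2)` loop: iterates the pattern's chars with counter i,
-- state (stack, result); arrival_pattern[i-2] is the current char
def pvLoopA : List Char → Int → List String × List String → List String × List String
  | [], _, st => st
  | c :: cs, i, (stack, result) =>
      let (stack, result) :=
        if c = 'I' then ([], pvFlushA stack result) else (stack, result)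
      pvLoopA cs (i + 1) (stack ++ [PySem.Int.toStr i], result)

def arrange_guest_arrival_order (arrival_pattern : String) : String :=
  let st := pvLoopA arrival_pattern.toList 2 (["1"], [])
  PySem.Str.join "" (pvFlushA st.1 st.2)

-- ===== PORT B =====
-- `while d < len(s) and s[d] != 'I': d += 1` — length of the leading non-'I' run
def pvCountD : List Char → Nat
  | [] => 0
  | c :: cs => if c = 'I' then 0 else pvCountD cs + 1

def pvGoB (s : List Char) (start : Int) : List String :=
  let d := pvCountD s
  let block := (List.range (d + 1)).map (fun t : Nat => PySem.Int.toStr (start + (d : Int) - (t : Int)))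
  if d < s.length then block ++ pvGoB (s.drop (d + 1)) (start + d + 1)
  else block
termination_by s.length
decreasing_by simp; omega

def arrange_guest_arrival_order_alt (arrival_pattern : String) : String :=
  PySem.Str.join "" (pvGoB arrival_pattern.toList 1)

-- ===== PRECONDITION & SPEC =====
def Spec_arrange_guest_arrival_order (arrival_pattern : String) (out : String) : Prop := out = arrange_guest_arrival_order_alt arrival_pattern
instance (arrival_pattern : String) (out : String) : Decidable (Spec_arrange_guest_arrival_order arrival_pattern out) := by unfold Spec_arrange_guest_arrival_order; infer_instance

-- ===== CLAIM (what is proved, stated in full; the proofs are below) =====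
def Claim_equal_arrange_guest_arrival_order : Prop := ∀ (arrival_pattern : String), Dom_arrange_guest_arrival_order arrival_pattern → Spec_arrange_guest_arrival_order arrival_pattern (arrange_guest_arrival_order arrival_pattern)

-- ===== LEMMAS AND PROOFS =====

-- ascending stack contents: [str j, str (j+1), …, str (j+m-1)]
def pvAsc (j : Int) (m : Nat) : List String :=
  (List.range m).map (fun t : Nat => PySem.Int.toStr (j + (t : Int)))

theorem pvFlushA_eq (s r : List String) : pvFlushA s r = r ++ s.reverse := by
  induction s, r using pvFlushA.induct with
  | case1 r => simp [pvFlushA]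
  | case2 a as r ih =>
      rw [pvFlushA, ih]
      have h := List.dropLast_append_getLast (l := a :: as) (by simp)
      conv_rhs => rw [← h]
      simp

theorem pvAsc_succ (j : Int) (m : Nat) :
    pvAsc j (m + 1) = pvAsc j m ++ [PySem.Int.toStr (j + m)] := by
  simp [pvAsc, List.range_succ]

theorem pvAsc_reverse (j : Int) (m : Nat) :
    (pvAsc j m).reverse
      = (List.range m).map (fun t : Nat => PySem.Int.toStr (j + (m : Int) - 1 - (t : Int))) := by
  induction m with
  | zero => simp [pvAsc]
  | succ m ih =>
      rw [pvAsc_succ, List.range_succ_eq_map]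
      simp only [List.reverse_append, List.reverse_singleton, List.singleton_append,
        List.map_cons, List.map_map, ih]
      congr 1
      · congr 1; push_cast; ring
      · apply List.map_congr_left
        intro t _
        simp only [Function.comp_apply]
        congr 1; push_cast; ring

-- the run-structured normal form both programs produce
def pvSeg (cs : List Char) (j : Int) (m : Nat) : List String :=
  (pvAsc j (m + pvCountD cs)).reverse ++
    (if pvCountD cs < cs.length then pvGoB (cs.drop (pvCountD cs + 1)) (j + m + pvCountD cs) else [])

theorem pvGoB_eq_seg (s : List Char) (start : Int) : pvGoB s start = pvSeg s start 1 := by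
  rw [pvGoB, pvSeg, pvAsc_reverse]
  have hmap : (List.range (pvCountD s + 1)).map
        (fun t : Nat => PySem.Int.toStr (start + (pvCountD s : Int) - (t : Int)))
      = (List.range (1 + pvCountD s)).map
        (fun t : Nat => PySem.Int.toStr (start + ((1 + pvCountD s : Nat) : Int) - 1 - (t : Int))) := by
    rw [Nat.add_comm 1 (pvCountD s)]
    apply List.map_congr_left
    intro t _; congr 1; push_cast; ring
  rw [← hmap]
  split
  · congr 2
    push_cast; ring
  · simp

theorem pvLoop_seg (cs : List Char) (j : Int) (m : Nat) (r : List String) (hm : 1 ≤ m) :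
    pvFlushA (pvLoopA cs (j + m) (pvAsc j m, r)).1 (pvLoopA cs (j + m) (pvAsc j m, r)).2
      = r ++ pvSeg cs j m := by
  induction cs generalizing j m r with
  | nil =>
      simp [pvLoopA, pvFlushA_eq, pvSeg, pvCountD]
  | cons c cs ih =>
      by_cases hc : c = 'I'
      · subst hc
        simp only [pvLoopA, if_true, pvFlushA_eq, List.nil_append]
        have h2 : [PySem.Int.toStr (j + (m : Int))] = pvAsc (j + (m : Int)) 1 := by
          simp [pvAsc]
        rw [h2]
        have h3 := ih (j + (m : Int)) 1 (r ++ (pvAsc j m).reverse) (le_refl 1)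
        rw [show ((j + (m : Int)) + ((1 : Nat) : Int)) = j + (m : Int) + 1 by push_cast; ring,
          pvFlushA_eq] at h3
        rw [h3]
        simp only [List.append_assoc]
        congr 1
        rw [← pvGoB_eq_seg]
        simp [pvSeg, pvCountD]
      · simp only [pvLoopA, if_neg hc]
        rw [← pvAsc_succ]
        have h3 := ih j (m + 1) r (by omega)
        rw [show (j + (m : Int) + 1) = j + (((m + 1 : Nat)) : Int) by push_cast; ring]
        rw [h3]
        congr 1
        rw [pvSeg, pvSeg]
        have hD : pvCountD (c :: cs) = pvCountD cs + 1 := by simp [pvCountD, hc]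
        rw [hD, show m + 1 + pvCountD cs = m + (pvCountD cs + 1) by omega]
        congr 1
        simp only [List.length_cons]
        by_cases hlt : pvCountD cs < cs.length
        · rw [if_pos hlt, if_pos (by omega)]
          rw [show pvCountD cs + 1 + 1 = (pvCountD cs + 1) + 1 by rfl, List.drop_succ_cons]
          congr 1
          push_cast; ring
        · rw [if_neg hlt, if_neg (by omega)]

-- ===== VERDICT (by name: the statement is the Claim_ definition above) =====
theorem arrange_guest_arrival_order_spec : Claim_equal_arrange_guest_arrival_order := by
  intro p _
  unfold Spec_arrange_guest_arrival_order arrange_guest_arrival_order arrange_guest_arrival_order_alt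
  change PySem.Str.join "" (pvFlushA (pvLoopA p.toList 2 (["1"], [])).1
      (pvLoopA p.toList 2 (["1"], [])).2) = _
  have h1 : (["1"] : List String) = pvAsc 1 1 := by decide
  have h2 : (2 : Int) = (1 : Int) + ((1 : Nat) : Int) := by norm_num
  rw [h1, h2, pvLoop_seg p.toList 1 1 [] (le_refl 1), pvGoB_eq_seg]
  simp
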